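-- pv_equiv track=rewrite | github.com/Carperis/PlannerX | AutoSelection.py | getSameTeacherTypes
-- ===== SOURCE A (Python) =====
-- def getSameTeacherTypes(types, sections):
--     result = []
--     professors = {}
--     for type in types:
--         subprofessors = []
--         noStaff = True
--         for i in range(0, len(sections)):
--             if(sections[i][3] == type):
--                 subprofessors.append(sections[i][2])
--                 if (sections[i][2] == "Staff"):
--                     noStaff = False
--         if (noStaff):
--             professors[type] = subprofessors
--     for type1 in list(professors.keys()):
--         isSame = False
--         for name1 in professors[type1]:
--             for type2 in list(professors.keys()):
--                 if (type2 != type1):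
--                     for name2 in professors[type2]:
--                         if (name1 == name2):
--                             isSame = True
--                             result.append(type1)
--                             break
--                 if (isSame):
--                     break
--             if (isSame):
--                 break
--     if (len(result) == 0):
--         result = [""]
--     return result
-- ===== SOURCE B (Python) =====
-- def getSameTeacherTypes(types, sections):
--     # One pass over sections groups professors by course type; an owners index
--     # (professor -> set of types) then replaces A's quadratic cross-scan.
--     by_type = {}
--     for sec in sections:
--         by_type.setdefault(sec[3], []).append(sec[2])
--     profs = {}
--     for t in types:
--         names = by_type.get(t, [])
--         if "Staff" not in names:
--             profs[t] = names
--     owners = {}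
--     for t, names in profs.items():
--         for n in names:
--             owners.setdefault(n, set()).add(t)
--     result = [t for t, names in profs.items()
--               if any(len(owners[n]) > 1 for n in names)]
--     return result if result else [""]
-- ===== Notes on version B (the rewrite author's own statement) =====
-- stated objective: faster
-- what changed: B groups professors by type in one pass over sections and builds a professor->set-of-types index, so a type qualifies when one of its professors' sets has size > 1, removing A's per-type rescan of sections and its quadratic type-by-type name cross-scan.
-- outside the precondition, e.g. on getSameTeacherTypes([], [['x']]): A returns [''], B raises IndexError
import Mathlib
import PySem

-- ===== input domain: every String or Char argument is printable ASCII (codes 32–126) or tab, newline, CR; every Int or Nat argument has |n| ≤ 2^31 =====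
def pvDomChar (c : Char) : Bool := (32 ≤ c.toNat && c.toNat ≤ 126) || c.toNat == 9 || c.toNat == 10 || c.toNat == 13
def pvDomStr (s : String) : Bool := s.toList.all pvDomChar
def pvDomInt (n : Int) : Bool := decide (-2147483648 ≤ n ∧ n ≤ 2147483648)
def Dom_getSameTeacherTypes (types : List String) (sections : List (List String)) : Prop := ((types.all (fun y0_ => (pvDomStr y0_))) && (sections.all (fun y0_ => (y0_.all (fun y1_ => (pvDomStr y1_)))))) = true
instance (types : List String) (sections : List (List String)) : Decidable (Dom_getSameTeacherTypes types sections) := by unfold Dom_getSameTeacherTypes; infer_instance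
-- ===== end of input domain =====

-- B builds a professor->set-of-types index in one pass instead of A's quadratic cross-scan; return-value equivalence proved on sections with ≥ 4 fields.

-- ===== PORT A =====
-- Python A loops 'for i in range(0, len(sections))' and reads sections[i][3] / sections[i][2];
-- indices i are always in range, and under Pre_ (every section has ≥ 4 fields) the field
-- accesses are exact, so they are ported as getD over the in-order fold of sections.
def pvA_collect (sections : List (List String)) (t : String) : List String × Bool :=
  sections.foldl (fun acc s =>
    if s.getD 3 "" == t then
      (acc.1 ++ [s.getD 2 ""], acc.2 && !(s.getD 2 "" == "Staff"))
    else acc) ([], true)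

def pvA_professors (types : List String) (sections : List (List String)) :
    PySem.Dict String (List String) :=
  types.foldl (fun d t =>
    let c := pvA_collect sections t
    if c.2 then d.insert t c.1 else d) PySem.Dict.empty

-- the second loop nest: the three breaks make 'append type1 on first witness', i.e. an any-scan
def pvA_result (types : List String) (sections : List (List String)) : List String :=
  let P := pvA_professors types sections
  P.keys.foldl (fun res t1 =>
    if (P.getD t1 []).any (fun n1 =>
        P.keys.any (fun t2 => !(t2 == t1) && (P.getD t2 []).contains n1)) then
      res ++ [t1]
    else res) []

def getSameTeacherTypes (types : List String) (sections : List (List String)) : List String :=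
  let result := pvA_result types sections
  if result.length = 0 then [""] else result

-- ===== PORT B =====
-- by_type.setdefault(sec[3], []).append(sec[2])  =  modify with default []
def pvB_byType (sections : List (List String)) : PySem.Dict String (List String) :=
  sections.foldl (fun d s => d.modify (s.getD 3 "") [] (· ++ [s.getD 2 ""])) PySem.Dict.empty

def pvB_profs (types : List String) (sections : List (List String)) :
    PySem.Dict String (List String) :=
  types.foldl (fun d t =>
    let names := (pvB_byType sections).getD t []
    if !(names.contains "Staff") then d.insert t names else d) PySem.Dict.empty

-- owners.setdefault(n, set()).add(t)  =  modify with default empty set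
def pvB_owners (types : List String) (sections : List (List String)) :
    PySem.Dict String (PySem.Set String) :=
  (pvB_profs types sections).items.foldl (fun d p =>
    p.2.foldl (fun d n => d.modify n PySem.Set.empty (fun s => PySem.Set.add s p.1)) d) PySem.Dict.empty

-- Python reads owners[n]; every n scanned here was inserted by the owners loop, so getD is exact
def pvB_result (types : List String) (sections : List (List String)) : List String :=
  (pvB_profs types sections).items.foldl (fun res p =>
    if p.2.any (fun n =>
        decide (1 < PySem.Set.len ((pvB_owners types sections).getD n PySem.Set.empty))) then
      res ++ [p.1]
    else res) []

def getSameTeacherTypes_alt (types : List String) (sections : List (List String)) : List String :=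
  let result := pvB_result types sections
  if result.isEmpty then [""] else result

-- ===== PRECONDITION & SPEC =====
-- Pre_: every section record has at least 4 fields, so A's accesses sections[i][3] / sections[i][2]
-- are defined (A raises IndexError on a shorter section whenever types is non-empty).  This also
-- excludes the degenerate corner of malformed sections together with types == [], on which A
-- returns [""] only because its loop over types never touches sections, while B's single pass over
-- sections raises there.
def Pre_getSameTeacherTypes (types : List String) (sections : List (List String)) : Prop :=
  ∀ s ∈ sections, 4 ≤ s.length
instance (types : List String) (sections : List (List String)) : Decidable (Pre_getSameTeacherTypes types sections) := by unfold Pre_getSameTeacherTypes; infer_instance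

def pvWitness_getSameTeacherTypes : List String × List (List String) :=
  (["T1", "T2"], [["CS", "10", "Al", "T1"], ["CS", "20", "Al", "T2"], ["CS", "30", "Staff", "T3"]])

def Spec_getSameTeacherTypes (types : List String) (sections : List (List String)) (out : List String) : Prop := out = getSameTeacherTypes_alt types sections
instance (types : List String) (sections : List (List String)) (out : List String) : Decidable (Spec_getSameTeacherTypes types sections out) := by unfold Spec_getSameTeacherTypes; infer_instance

-- ===== CLAIM (what is proved, stated in full; the proofs are below) =====
def Claim_equal_getSameTeacherTypes : Prop := ∀ (types : List String) (sections : List (List String)), Dom_getSameTeacherTypes types sections → Pre_getSameTeacherTypes types sections → Spec_getSameTeacherTypes types sections (getSameTeacherTypes types sections)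

-- ===== LEMMAS AND PROOFS =====

-- the professors of type t, in section order: both dicts map t to this list
def pvNames (sections : List (List String)) (t : String) : List String :=
  (sections.filter (fun s => s.getD 3 "" == t)).map (fun s => s.getD 2 "")

lemma pv_all_not_staff (l : List String) :
    (l.all fun x => !(x == "Staff")) = !(l.contains "Staff") := by
  induction l with
  | nil => rfl
  | cons a l ih =>
      rw [List.all_cons, List.contains_cons, Bool.not_or, ih]
      congr 1
      simp [Bool.beq_eq_decide_eq, eq_comm]

lemma pvA_collect_eq (sections : List (List String)) (t : String) :
    pvA_collect sections t = (pvNames sections t, !((pvNames sections t).contains "Staff")) := by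
  rw [← pv_all_not_staff]
  unfold pvA_collect
  suffices h : ∀ acc : List String × Bool,
      sections.foldl (fun acc s =>
        if s.getD 3 "" == t then
          (acc.1 ++ [s.getD 2 ""], acc.2 && !(s.getD 2 "" == "Staff"))
        else acc) acc
      = (acc.1 ++ pvNames sections t,
         acc.2 && (pvNames sections t).all (fun x => !(x == "Staff"))) by
    rw [h ([], true)]; simp
  induction sections with
  | nil => intro acc; simp [pvNames]
  | cons s ss ih =>
      intro acc
      simp only [List.foldl_cons]
      by_cases h : (s.getD 3 "" == t) = true
      · rw [if_pos h, ih]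
        have h' : s[3]?.getD "" = t := by simpa using h
        simp [pvNames, h', List.all_cons, Bool.and_assoc, Function.comp_def]
      · rw [if_neg h, ih]
        have h' : ¬ (s[3]?.getD "" = t) := by simpa using h
        simp [pvNames, h', Function.comp_def]

lemma pvB_byType_getD (sections : List (List String)) (t : String) :
    (pvB_byType sections).getD t [] = pvNames sections t := by
  have h := PySem.Dict.getD_foldl_modify_append
    (sections.map (fun s => (s.getD 3 "", s.getD 2 ""))) PySem.Dict.empty t
  rw [List.foldl_map] at h
  unfold pvB_byType
  simpa [pvNames, List.filter_map, List.map_map, Function.comp_def] using h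

lemma pv_profs_eq (types : List String) (sections : List (List String)) :
    pvA_professors types sections = pvB_profs types sections := by
  unfold pvA_professors pvB_profs
  have hstep : (fun (d : PySem.Dict String (List String)) t =>
        let c := pvA_collect sections t
        if c.2 then d.insert t c.1 else d)
      = (fun (d : PySem.Dict String (List String)) t =>
        let names := (pvB_byType sections).getD t []
        if !(names.contains "Staff") then d.insert t names else d) := by
    funext d t
    simp only [pvA_collect_eq, pvB_byType_getD]
  rw [hstep]

lemma pv_profs_keys_nodup (types : List String) (sections : List (List String)) :
    (pvA_professors types sections).keys.Nodup := by
  unfold pvA_professors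
  suffices h : ∀ (l : List String) (d : PySem.Dict String (List String)), d.keys.Nodup →
      (l.foldl (fun d t =>
        let c := pvA_collect sections t
        if c.2 then d.insert t c.1 else d) d).keys.Nodup from
    h types PySem.Dict.empty PySem.Dict.nodup_keys_empty
  intro l
  induction l with
  | nil => intro d hd; simpa using hd
  | cons t l ih =>
      intro d hd
      rw [List.foldl_cons]
      show (l.foldl (fun d t =>
              let c := pvA_collect sections t
              if c.2 then d.insert t c.1 else d)
            (if (pvA_collect sections t).2 then d.insert t (pvA_collect sections t).1 else d)).keys.Nodup
      split_ifs with h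
      · exact ih _ (PySem.Dict.nodup_keys_insert _ _ _ hd)
      · exact ih _ hd

-- membership in a nodup-keys dict's items, phrased through getD
lemma pv_mem_items_iff {P : PySem.Dict String (List String)} (hnd : P.keys.Nodup)
    (p : String × List String) :
    p ∈ P.items ↔ p.1 ∈ P.keys ∧ P.getD p.1 [] = p.2 := by
  obtain ⟨k, w⟩ := p
  constructor
  · intro h
    exact ⟨PySem.Dict.mem_keys_of_mem_items P h, PySem.Dict.getD_of_mem_items P h hnd []⟩
  · rintro ⟨hk, hv⟩
    have hc : P.contains k = true := (PySem.Dict.contains_iff_mem_keys _ _).mpr hk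
    rw [PySem.Dict.contains_eq_isSome_get?] at hc
    obtain ⟨v, hv'⟩ := Option.isSome_iff_exists.mp hc
    have hgd : P.getD k [] = v := PySem.Dict.getD_of_get?_eq_some _ [] hv'
    have hvp : v = w := by rw [← hgd, hv]
    subst hvp
    exact (PySem.Dict.get?_eq_some_iff_mem_items _ _ _ hnd).mp hv'

lemma pv_inner_getD (t : String) (names : List String) :
    ∀ (d : PySem.Dict String (PySem.Set String)) (x : String),
      (names.foldl (fun d n => d.modify n PySem.Set.empty (fun s => PySem.Set.add s t)) d).getD x PySem.Set.empty
      = if x ∈ names then PySem.Set.add (d.getD x PySem.Set.empty) t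
        else d.getD x PySem.Set.empty := by
  induction names with
  | nil => intro d x; simp
  | cons n ns ih =>
      intro d x
      simp only [List.foldl_cons, ih, PySem.Dict.getD_modify]
      by_cases hx : x = n <;> by_cases hm : x ∈ ns <;>
        simp [hx, hm, List.mem_cons]

lemma pv_owners_mem (l : List (String × List String)) :
    ∀ (d : PySem.Dict String (PySem.Set String)) (x y : String),
      (y ∈ (l.foldl (fun d p =>
          p.2.foldl (fun d n => d.modify n PySem.Set.empty (fun s => PySem.Set.add s p.1)) d) d).getD x PySem.Set.empty)
      ↔ y ∈ d.getD x PySem.Set.empty ∨ ∃ p ∈ l, x ∈ p.2 ∧ y = p.1 := by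
  induction l with
  | nil => intro d x y; simp
  | cons p ps ih =>
      intro d x y
      simp only [List.foldl_cons, ih, pv_inner_getD]
      by_cases h : x ∈ p.2 <;>
        simp [h, PySem.Set.mem_add, List.mem_cons] <;> tauto

lemma pv_owners_nodup (l : List (String × List String)) :
    ∀ (d : PySem.Dict String (PySem.Set String)),
      (∀ x, (d.getD x PySem.Set.empty).Nodup) →
      ∀ x, ((l.foldl (fun d p =>
          p.2.foldl (fun d n => d.modify n PySem.Set.empty (fun s => PySem.Set.add s p.1)) d) d).getD x PySem.Set.empty).Nodup := by
  induction l with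
  | nil => intro d hd x; exact hd x
  | cons p ps ih =>
      intro d hd x
      simp only [List.foldl_cons]
      refine ih _ (fun z => ?_) x
      rw [pv_inner_getD]
      by_cases h : z ∈ p.2
      · rw [if_pos h]; exact PySem.Set.nodup_add _ _ (hd z)
      · rw [if_neg h]; exact hd z

lemma pv_one_lt_length {s : List String} (hnd : s.Nodup) {t1 : String} (ht : t1 ∈ s) :
    1 < s.length ↔ ∃ y ∈ s, y ≠ t1 := by
  constructor
  · intro h
    by_contra hc
    push_neg at hc
    match s, hnd, ht, h, hc with
    | a :: b :: r, hnd, _, _, hc =>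
        have ha := hc a (by simp)
        have hb := hc b (by simp)
        simp [ha, hb] at hnd
  · rintro ⟨y, hy, hne⟩
    match s, ht, hy with
    | [a], ht, hy =>
        simp at ht hy; subst ht; subst hy; exact absurd rfl hne
    | a :: b :: r, _, _ => simp
    | [], ht, _ => simp at ht

-- the B-side loop shape: append p.1 on a boolean test = map fst of a filter
lemma pv_foldl_append_fst (q : String × List String → Bool) :
    ∀ (l : List (String × List String)) (init : List String),
      l.foldl (fun res p => if q p then res ++ [p.1] else res) init
      = init ++ (l.filter q).map (·.1) := by
  intro l
  induction l with
  | nil => intro init; simp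
  | cons p ps ih =>
      intro init
      by_cases h : q p = true <;> simp [h, ih]

-- the crux: for (t1, names) an entry of the professors dict, A's cross-scan over all other
-- types equals B's size test on the owners index
lemma pv_pred_eq (types : List String) (sections : List (List String))
    (p : String × List String) (hp : p ∈ (pvA_professors types sections).items) :
    ((pvA_professors types sections).getD p.1 []).any (fun n1 =>
        (pvA_professors types sections).keys.any (fun t2 =>
          !(t2 == p.1) && ((pvA_professors types sections).getD t2 []).contains n1))
    = p.2.any (fun n =>
        decide (1 < PySem.Set.len ((pvB_owners types sections).getD n PySem.Set.empty))) := by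
  obtain ⟨t1, names⟩ := p
  set P := pvA_professors types sections with hP
  have hnd : P.keys.Nodup := pv_profs_keys_nodup types sections
  have hgetD : P.getD t1 [] = names := PySem.Dict.getD_of_mem_items P hp hnd []
  have howners : ∀ x y : String,
      y ∈ (pvB_owners types sections).getD x PySem.Set.empty
      ↔ ∃ q ∈ P.items, x ∈ q.2 ∧ y = q.1 := by
    intro x y
    unfold pvB_owners
    rw [← pv_profs_eq]
    rw [pv_owners_mem]
    simp only [PySem.Dict.getD_empty]
    simp [PySem.Set.empty, hP]
  have hownnd : ∀ x, ((pvB_owners types sections).getD x PySem.Set.empty).Nodup := by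
    intro x
    unfold pvB_owners
    rw [← pv_profs_eq]
    exact pv_owners_nodup _ _ (fun z => by simp [PySem.Dict.getD_empty, PySem.Set.empty]) x
  rw [hgetD]
  rw [Bool.eq_iff_iff]
  simp only [List.any_eq_true]
  constructor
  · rintro ⟨n, hn, hex⟩
    simp only [Bool.and_eq_true, Bool.not_eq_true', beq_eq_false_iff_ne] at hex
    obtain ⟨t2, ht2k, ht2ne, ht2c⟩ := hex
    refine ⟨n, hn, ?_⟩
    rw [decide_eq_true_iff]
    rw [show PySem.Set.len ((pvB_owners types sections).getD n PySem.Set.empty)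
        = (((pvB_owners types sections).getD n PySem.Set.empty).length : Int) from rfl,
      Nat.one_lt_cast]
    rw [pv_one_lt_length (hownnd n) ((howners n t1).mpr ⟨(t1, names), hp, hn, rfl⟩)]
    have hc : n ∈ P.getD t2 [] := by
      simpa using ht2c
    exact ⟨t2, (howners n t2).mpr ⟨(t2, P.getD t2 []), (pv_mem_items_iff hnd _).mpr ⟨ht2k, rfl⟩, hc, rfl⟩, ht2ne⟩
  · rintro ⟨n, hn, hlen⟩
    rw [decide_eq_true_iff] at hlen
    rw [show PySem.Set.len ((pvB_owners types sections).getD n PySem.Set.empty)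
        = (((pvB_owners types sections).getD n PySem.Set.empty).length : Int) from rfl,
      Nat.one_lt_cast] at hlen
    rw [pv_one_lt_length (hownnd n) ((howners n t1).mpr ⟨(t1, names), hp, hn, rfl⟩)] at hlen
    obtain ⟨y, hy, hne⟩ := hlen
    obtain ⟨q, hq, hnq, rfl⟩ := (howners n y).mp hy
    refine ⟨n, hn, ?_⟩
    simp only [Bool.and_eq_true, Bool.not_eq_true', beq_eq_false_iff_ne]
    obtain ⟨u, unames⟩ := q
    refine ⟨u, PySem.Dict.mem_keys_of_mem_items P hq, hne, ?_⟩
    have : P.getD u [] = unames := PySem.Dict.getD_of_mem_items P hq hnd []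
    simp [this, hnq]

lemma pv_result_eq (types : List String) (sections : List (List String)) :
    pvA_result types sections = pvB_result types sections := by
  unfold pvA_result pvB_result
  rw [← pv_profs_eq]
  set P := pvA_professors types sections with hP
  have hnd : P.keys.Nodup := pv_profs_keys_nodup types sections
  rw [PySem.List.foldl_append_if_eq_filter, pv_foldl_append_fst]
  simp only [List.nil_append]
  rw [show P.keys = P.items.map (·.1) from rfl]
  rw [List.filter_map]
  congr 1
  apply List.filter_congr
  intro p hp
  exact pv_pred_eq types sections p hp

-- ===== VERDICT (by name: the statement is the Claim_ definition above) =====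
theorem getSameTeacherTypes_spec : Claim_equal_getSameTeacherTypes := by
  intro types sections _dom _pre
  unfold Spec_getSameTeacherTypes getSameTeacherTypes getSameTeacherTypes_alt
  rw [pv_result_eq]
  cases pvB_result types sections <;> simp
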